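-- pv_equiv track=rewrite | github.com/dkreinov/frames-to-film | tests/backend/test_story.py | _fake_llm_response_text
-- ===== SOURCE A (Python) =====
-- def _fake_llm_response_text(n_pairs: int) -> str:
--     pair_intents = ", ".join(
--         f'{{"from": {i}, "to": {i + 1}, "device": "cross_dissolve", '
--         f'"intent": "Slow dolly forward."}}'
--         for i in range(1, n_pairs + 1)
--     )
--     return (
--         '{"arc_paragraph": "A test arc paragraph spanning three beats.", '
--         f'"pair_intents": [{pair_intents}]}}'
--     )
-- ===== SOURCE B (Python) =====
-- import json
--
--
-- def _fake_llm_response_text(n_pairs: int) -> str: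
--     obj = {
--         "arc_paragraph": "A test arc paragraph spanning three beats.",
--         "pair_intents": [
--             {
--                 "from": i,
--                 "to": i + 1,
--                 "device": "cross_dissolve",
--                 "intent": "Slow dolly forward.",
--             }
--             for i in range(1, n_pairs + 1)
--         ],
--     }
--     return json.dumps(obj)
-- ===== Notes on version B (the rewrite author's own statement) =====
-- stated objective: idiomatic
-- what changed: B builds the native dict/list object and serialises it with json.dumps (default separators), instead of A's hand-assembled f-string fragments joined by str.join.
import Mathlib
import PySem

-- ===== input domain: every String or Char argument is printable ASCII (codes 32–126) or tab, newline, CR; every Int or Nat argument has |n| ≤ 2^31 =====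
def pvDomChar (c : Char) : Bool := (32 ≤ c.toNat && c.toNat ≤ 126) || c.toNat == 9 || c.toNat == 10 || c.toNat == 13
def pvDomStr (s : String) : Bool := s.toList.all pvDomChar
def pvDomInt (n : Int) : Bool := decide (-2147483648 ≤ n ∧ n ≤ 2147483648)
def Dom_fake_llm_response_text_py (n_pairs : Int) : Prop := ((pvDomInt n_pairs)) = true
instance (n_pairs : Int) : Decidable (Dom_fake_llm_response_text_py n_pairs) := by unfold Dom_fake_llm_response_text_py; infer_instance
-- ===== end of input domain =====

-- B builds the native dict/list object and serialises it json.dumps-style (idiomatic), instead of A's hand-composed f-strings.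


-- ===== PORT A =====
-- literal transliteration: join of f-strings over range(1, n_pairs+1)
def fake_llm_response_text_py (n_pairs : Int) : String :=
  let pair_intents := PySem.Str.join ", "
    ((PySem.List.pyRange 1 (n_pairs + 1) 1).map (fun i =>
      "{\"from\": " ++ PySem.Int.toStr i ++ ", \"to\": " ++ PySem.Int.toStr (i + 1) ++
      ", \"device\": \"cross_dissolve\", \"intent\": \"Slow dolly forward.\"}"))
  "{\"arc_paragraph\": \"A test arc paragraph spanning three beats.\", " ++
    ("\"pair_intents\": [" ++ pair_intents ++ "]}")

-- ===== PORT B =====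
-- hand port of json.dumps specialised to this object shape (default ", "/": " separators)
inductive PvJson where
  | jint : Int → PvJson
  | jstr : String → PvJson
  deriving DecidableEq, Repr

def pvDumpScalar : PvJson → String
  | PvJson.jint n => PySem.Int.toStr n
  | PvJson.jstr s => "\"" ++ s ++ "\""   -- exact: all our strings are plain ASCII needing no escapes

def pvDumpObj (fields : List (String × PvJson)) : String :=
  "{" ++ PySem.Str.join ", " (fields.map (fun kv => "\"" ++ kv.1 ++ "\": " ++ pvDumpScalar kv.2)) ++ "}"

def fake_llm_response_text_py_alt (n_pairs : Int) : String :=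
  let items : List (List (String × PvJson)) :=
    (PySem.List.pyRange 1 (n_pairs + 1) 1).map (fun i =>
      [("from", PvJson.jint i), ("to", PvJson.jint (i + 1)),
       ("device", PvJson.jstr "cross_dissolve"), ("intent", PvJson.jstr "Slow dolly forward.")])
  let arr := "[" ++ PySem.Str.join ", " (items.map pvDumpObj) ++ "]"
  "{" ++ PySem.Str.join ", "
      ["\"arc_paragraph\": " ++ pvDumpScalar (PvJson.jstr "A test arc paragraph spanning three beats."),
       "\"pair_intents\": " ++ arr] ++ "}"

-- ===== PRECONDITION & SPEC =====
def Spec_fake_llm_response_text_py (n_pairs : Int) (out : String) : Prop := out = fake_llm_response_text_py_alt n_pairs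
instance (n_pairs : Int) (out : String) : Decidable (Spec_fake_llm_response_text_py n_pairs out) := by unfold Spec_fake_llm_response_text_py; infer_instance

-- ===== CLAIM (what is proved, stated in full; the proofs are below) =====
def Claim_equal_fake_llm_response_text_py : Prop := ∀ (n_pairs : Int), Dom_fake_llm_response_text_py n_pairs → Spec_fake_llm_response_text_py n_pairs (fake_llm_response_text_py n_pairs)

-- ===== LEMMAS AND PROOFS =====

-- each serialised item equals A's f-string piece
theorem pv_item_eq (i : Int) :
    pvDumpObj [("from", PvJson.jint i), ("to", PvJson.jint (i + 1)),
       ("device", PvJson.jstr "cross_dissolve"), ("intent", PvJson.jstr "Slow dolly forward.")] =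
    "{\"from\": " ++ PySem.Int.toStr i ++ ", \"to\": " ++ PySem.Int.toStr (i + 1) ++
      ", \"device\": \"cross_dissolve\", \"intent\": \"Slow dolly forward.\"}" := by
  simp [pvDumpObj, pvDumpScalar]
  ext : 1
  simp [PySem.Str.join, PySem.Chars.join, List.intercalate, List.intersperse]

-- ===== VERDICT (by name: the statement is the Claim_ definition above) =====
theorem fake_llm_response_text_py_spec : Claim_equal_fake_llm_response_text_py := by
  intro n _
  unfold Spec_fake_llm_response_text_py fake_llm_response_text_py fake_llm_response_text_py_alt
  simp only [List.map_map]
  rw [show ((PySem.List.pyRange 1 (n + 1) 1).map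
      (pvDumpObj ∘ fun i =>
        [("from", PvJson.jint i), ("to", PvJson.jint (i + 1)),
         ("device", PvJson.jstr "cross_dissolve"), ("intent", PvJson.jstr "Slow dolly forward.")])) =
    ((PySem.List.pyRange 1 (n + 1) 1).map (fun i =>
      "{\"from\": " ++ PySem.Int.toStr i ++ ", \"to\": " ++ PySem.Int.toStr (i + 1) ++
      ", \"device\": \"cross_dissolve\", \"intent\": \"Slow dolly forward.\"}")) from
    List.map_congr_left (fun i _ => pv_item_eq i)]
  generalize (PySem.Str.join ", " _) = j
  simp [pvDumpScalar]
  ext : 1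
  simp [PySem.Str.join, PySem.Chars.join, List.intercalate, List.intersperse]
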